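-- pv_equiv track=rewrite | github.com/davidcpp-ython/Python101 | Py101-Lab1/task_6/task06.py | func
-- ===== SOURCE A (Python) =====
-- def func(size):
--     romb = ""
--
--     ################### TO DO #########################
--     if size % 2 == 0:
--         n = size + 1
--     else:
--         n = size
--     for i in range(int((n - 1) / 2)):
--         for j in range(i, int((n - 1) / 2)):
--             romb = romb + " "
--         romb = romb + "@"
--         for j in range(i):
--             romb += ".."
--         romb += "@\n"
--     for i in range(int((n - 1) / 2) + 1):
--         for j in range(i):
--             romb = romb + " "
--         romb = romb + "@"
--         for j in range(i, int(((n - 1) / 2))):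
--             romb += ".."
--         romb += "@\n"
--     ###################################################
--
--     return romb
-- ===== SOURCE B (Python) =====
-- def func(size):
--     n = size + 1 if size % 2 == 0 else size
--     m = (n - 1) // 2
--     return ''.join(' ' * abs(r - m) + '@' + '..' * (m - abs(r - m)) + '@\n'
--                    for r in range(2 * m + 1))
-- ===== Notes on version B (the rewrite author's own statement) =====
-- stated objective: simpler
-- what changed: Replaces the two half-rhombus loops with their three inner space/dot character loops each by a single pass over every row, building each line directly from its distance to the middle row and joining once.
import Mathlib
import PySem

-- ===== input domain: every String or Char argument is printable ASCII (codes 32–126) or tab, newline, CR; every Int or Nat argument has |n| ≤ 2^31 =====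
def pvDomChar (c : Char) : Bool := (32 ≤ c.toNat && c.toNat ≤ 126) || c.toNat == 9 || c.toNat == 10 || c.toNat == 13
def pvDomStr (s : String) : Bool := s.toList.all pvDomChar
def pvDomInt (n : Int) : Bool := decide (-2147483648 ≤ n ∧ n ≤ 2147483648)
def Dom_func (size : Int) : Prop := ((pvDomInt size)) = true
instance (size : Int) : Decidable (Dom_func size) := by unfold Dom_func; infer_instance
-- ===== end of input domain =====

-- B replaces A's two half-rhombus loops (each with three inner character loops) by one
-- pass over all rows, building each line from its distance to the middle row (simpler).

-- ===== PORT A =====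
-- strings are ported on the List Char side (String.mk at the end); 'romb + "@\n"' etc.
-- are the corresponding character-list appends, exact.
def func (size : Int) : String :=
  let n : Int := if PySem.Int.mod size 2 == 0 then size + 1 else size
  -- int((n - 1) / 2): float division then int truncates toward zero; exact here since
  -- |n - 1| < 2^53, so it is Int.tdiv (= PySem.Int.truncdiv)
  let romb : List Char :=
    (PySem.List.pyRange 0 (PySem.Int.truncdiv (n - 1) 2) 1).foldl (fun romb i =>
      let romb := (PySem.List.pyRange i (PySem.Int.truncdiv (n - 1) 2) 1).foldl
        (fun romb _ => romb ++ [' ']) romb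
      let romb := romb ++ ['@']
      let romb := (PySem.List.pyRange 0 i 1).foldl (fun romb _ => romb ++ ['.', '.']) romb
      romb ++ ['@', '\n']) []
  let romb :=
    (PySem.List.pyRange 0 (PySem.Int.truncdiv (n - 1) 2 + 1) 1).foldl (fun romb i =>
      let romb := (PySem.List.pyRange 0 i 1).foldl (fun romb _ => romb ++ [' ']) romb
      let romb := romb ++ ['@']
      let romb := (PySem.List.pyRange i (PySem.Int.truncdiv (n - 1) 2) 1).foldl
        (fun romb _ => romb ++ ['.', '.']) romb
      romb ++ ['@', '\n']) romb
  String.mk romb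

-- ===== PORT B =====
-- ' ' * k and '..' * k are PySem.List.pyRepeat on code points; abs(r - m) is natAbs.
def func_alt (size : Int) : String :=
  let n : Int := if PySem.Int.mod size 2 == 0 then size + 1 else size
  let m : Int := PySem.Int.floordiv (n - 1) 2
  String.mk (PySem.Chars.join []
    ((PySem.List.pyRange 0 (2 * m + 1) 1).map (fun r =>
      PySem.List.pyRepeat [' '] ((r - m).natAbs : Int) ++ ['@'] ++
      PySem.List.pyRepeat ['.', '.'] (m - ((r - m).natAbs : Int)) ++ ['@', '\n'])))

-- ===== PRECONDITION & SPEC =====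
def Spec_func (size : Int) (out : String) : Prop := out = func_alt size
instance (size : Int) (out : String) : Decidable (Spec_func size out) := by unfold Spec_func; infer_instance

-- ===== CLAIM (what is proved, stated in full; the proofs are below) =====
def Claim_equal_func : Prop := ∀ (size : Int), Dom_func size → Spec_func size (func size)

-- ===== LEMMAS AND PROOFS =====

-- canonical row: sp spaces, '@', d dot-pairs, '@\n'
def pvRow (sp d : Nat) : List Char :=
  List.replicate sp ' ' ++ ['@'] ++ (List.replicate d ['.', '.']).flatten ++ ['@', '\n']

theorem pv_flatten_replicate_singleton (k : Nat) (c : Char) :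
    (List.replicate k [c]).flatten = List.replicate k c := by
  induction k with
  | zero => rfl
  | succ k ih => simp [List.replicate_succ, ih]

theorem pv_foldl_const_append {α : Type} (l : List α) (c acc : List Char) :
    l.foldl (fun r _ => r ++ c) acc = acc ++ (List.replicate l.length c).flatten := by
  induction l generalizing acc with
  | nil => simp
  | cons a t ih => simp [List.replicate_succ, ih]

theorem pv_join_nil (parts : List (List Char)) :
    PySem.Chars.join [] parts = parts.flatten := by
  induction parts with
  | nil => rfl
  | cons p t ih =>
    cases t with
    | nil => simp [PySem.Chars.join_singleton]
    | cons q u => rw [PySem.Chars.join_cons_cons, ih]; simp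

-- A's first half-loop appends pvRow (m-i) i for i = 0..m-1
theorem pvA1 (m acc : _) :
    (PySem.List.pyRange 0 m 1).foldl (fun romb i =>
      let romb := (PySem.List.pyRange i m 1).foldl (fun romb _ => romb ++ [' ']) romb
      let romb := romb ++ ['@']
      let romb := (PySem.List.pyRange 0 i 1).foldl (fun romb _ => romb ++ ['.', '.']) romb
      romb ++ ['@', '\n']) acc
    = acc ++ (PySem.List.pyRange 0 m 1).flatMap (fun i => pvRow (m - i).toNat i.toNat) := by
  rw [PySem.List.foldl_congr_mem
      (g := fun romb i => romb ++ pvRow (m - i).toNat i.toNat)]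
  · exact PySem.List.foldl_append_eq_flatMap _ _ _
  · intro a i _
    simp only [pv_foldl_const_append, PySem.List.length_pyRange_one, pvRow,
      pv_flatten_replicate_singleton]
    simp

-- A's second half-loop appends pvRow i (m-i) for i = 0..m
theorem pvA2 (m acc : _) :
    (PySem.List.pyRange 0 (m + 1) 1).foldl (fun romb i =>
      let romb := (PySem.List.pyRange 0 i 1).foldl (fun romb _ => romb ++ [' ']) romb
      let romb := romb ++ ['@']
      let romb := (PySem.List.pyRange i m 1).foldl (fun romb _ => romb ++ ['.', '.']) romb
      romb ++ ['@', '\n']) acc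
    = acc ++ (PySem.List.pyRange 0 (m + 1) 1).flatMap
        (fun i => pvRow i.toNat (m - i).toNat) := by
  rw [PySem.List.foldl_congr_mem
      (g := fun romb i => romb ++ pvRow i.toNat (m - i).toNat)]
  · exact PySem.List.foldl_append_eq_flatMap _ _ _
  · intro a i _
    simp only [pv_foldl_const_append, PySem.List.length_pyRange_one, pvRow,
      pv_flatten_replicate_singleton]
    simp

-- B's row equals pvRow
theorem pvBrow (m r : Int) :
    PySem.List.pyRepeat [' '] ((r - m).natAbs : Int) ++ ['@'] ++
      PySem.List.pyRepeat ['.', '.'] (m - ((r - m).natAbs : Int)) ++ ['@', '\n']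
    = pvRow (r - m).natAbs (m - ((r - m).natAbs : Int)).toNat := by
  simp only [PySem.List.pyRepeat, pvRow, Int.toNat_natCast, pv_flatten_replicate_singleton,
    List.append_assoc]

-- the central identity, for the common value m of A's tdiv and B's floordiv
theorem pv_main (m : Int) :
    (PySem.List.pyRange 0 m 1).flatMap (fun i => pvRow (m - i).toNat i.toNat) ++
      (PySem.List.pyRange 0 (m + 1) 1).flatMap (fun i => pvRow i.toNat (m - i).toNat)
    = (PySem.List.pyRange 0 (2 * m + 1) 1).flatMap
        (fun r => pvRow (r - m).natAbs (m - ((r - m).natAbs : Int)).toNat) := by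
  by_cases hm : m < 0
  · rw [PySem.List.pyRange_one_eq_nil (by omega),
        PySem.List.pyRange_one_eq_nil (by omega),
        PySem.List.pyRange_one_eq_nil (by omega)]
    rfl
  · have hm : 0 ≤ m := by omega
    rw [PySem.List.pyRange_one_append 0 m (2 * m + 1) hm (by omega),
        List.flatMap_append]
    congr 1
    · refine List.flatMap_congr ?_
      intro r hr
      rw [PySem.List.mem_pyRange_one] at hr
      congr 1 <;> omega
    · rw [PySem.List.pyRange_one 0 (m + 1), PySem.List.pyRange_one m (2 * m + 1)]
      have hlen : (2 * m + 1 - m).toNat = (m + 1 - 0).toNat := by omega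
      rw [hlen, List.flatMap_map, List.flatMap_map]
      refine List.flatMap_congr ?_
      intro k hk
      congr 1 <;> omega

theorem pv_tdiv_eq_floordiv (a : Int) (h : 2 ∣ a) :
    PySem.Int.truncdiv a 2 = PySem.Int.floordiv a 2 := by
  obtain ⟨t, rfl⟩ := h
  rw [PySem.Int.floordiv_eq_ediv_of_pos (by omega)]
  show Int.tdiv (2 * t) 2 = 2 * t / 2
  rw [Int.mul_tdiv_cancel_left _ (by omega), Int.mul_ediv_cancel_left _ (by omega)]

-- ===== VERDICT (by name: the statement is the Claim_ definition above) =====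
theorem func_spec : Claim_equal_func := by
  intro size _
  unfold Spec_func func func_alt
  dsimp only
  have hdvd : 2 ∣ ((if PySem.Int.mod size 2 == 0 then size + 1 else size) - 1) := by
    by_cases h : PySem.Int.mod size 2 == 0
    · rw [if_pos h]
      have := (PySem.Int.mod_eq_zero_iff_dvd size 2).mp (by simpa using h)
      omega
    · rw [if_neg h]
      have h2 : ¬ (2 ∣ size) := by
        rw [← PySem.Int.mod_eq_zero_iff_dvd]
        simpa using h
      omega
  rw [pv_tdiv_eq_floordiv _ hdvd, pvA1, pvA2]
  simp only [List.nil_append, pv_join_nil, pvBrow]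
  rw [pv_main]
  simp [List.flatMap_def]
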